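-- pv_equiv track=rewrite | github.com/sbrommer/kattis | fishmongers.py | sell
-- ===== SOURCE A (Python) =====
-- def sell(fish, mongers):
--     monies = 0
--     i = 0
--
--     for x, p in mongers:
--         for _ in range(x):
--             if i == len(fish):
--                 return monies
--
--             monies += fish[i] * p
--             i += 1
--
--     return monies
-- ===== SOURCE B (Python) =====
-- def sell(fish, mongers):
--     prices = []
--     for x, p in mongers:
--         if len(prices) >= len(fish):
--             break
--         prices += [p] * min(max(x, 0), len(fish) - len(prices))
--     return sum(f * pr for f, pr in zip(fish, prices))
-- ===== Notes on version B (the rewrite author's own statement) =====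
-- stated objective: simpler
-- what changed: Replaces the nested loop with index bookkeeping and an early return by flattening the mongers into a per-fish price list (capped at len(fish) entries) and summing zip(fish, prices), where zip's truncation replaces both termination conditions.
import Mathlib
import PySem

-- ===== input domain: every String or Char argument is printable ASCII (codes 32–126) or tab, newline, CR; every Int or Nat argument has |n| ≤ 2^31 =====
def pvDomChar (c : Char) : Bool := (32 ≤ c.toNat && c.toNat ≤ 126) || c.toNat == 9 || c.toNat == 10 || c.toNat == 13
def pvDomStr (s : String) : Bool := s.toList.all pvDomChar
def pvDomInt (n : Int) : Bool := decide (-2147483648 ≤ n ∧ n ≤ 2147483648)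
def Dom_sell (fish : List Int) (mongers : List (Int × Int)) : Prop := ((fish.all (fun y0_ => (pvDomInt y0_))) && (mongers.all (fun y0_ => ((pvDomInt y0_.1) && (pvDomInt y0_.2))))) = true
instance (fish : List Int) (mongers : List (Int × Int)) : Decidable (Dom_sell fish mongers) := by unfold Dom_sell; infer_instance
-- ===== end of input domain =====

-- B flattens the mongers into a per-fish price list (capped at len(fish) entries) and sums
-- zip(fish, prices); simpler than A's nested loops with an index and an early return.
-- Equivalence of return values is proved on all inputs.

-- ===== PORT A =====
-- inner 'for _ in range(x)' loop: returns Sum.inl (i, monies) on normal exit,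
-- Sum.inr monies when the 'return monies' fires (i == len(fish)).
-- fish[i] is read with List.getD; the loop guarantees i < fish.length at the read.
def sellInner (fish : List Int) (p : Int) : Nat → Nat → Int → (Nat × Int) ⊕ Int
  | 0, i, m => Sum.inl (i, m)
  | n+1, i, m =>
      if i = fish.length then Sum.inr m
      else sellInner fish p n (i+1) (m + (fish.getD i 0) * p)

-- outer 'for x, p in mongers' loop; an early return from the inner loop ends the whole function
def sellGo (fish : List Int) : List (Int × Int) → Nat → Int → Int
  | [], _, m => m
  | (x, p) :: rest, i, m =>
      Sum.elim (fun im => sellGo fish rest im.1 im.2) id (sellInner fish p x.toNat i m)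

def sell (fish : List Int) (mongers : List (Int × Int)) : Int :=
  sellGo fish mongers 0 0

-- ===== PORT B =====
-- the 'for x, p in mongers' loop of Source B building the capped price list
def sellAltPrices (fish : List Int) : List (Int × Int) → List Int → List Int
  | [], acc => acc
  | (x, p) :: rest, acc =>
      if fish.length ≤ acc.length then acc
      else sellAltPrices fish rest
            (acc ++ List.replicate (min x.toNat (fish.length - acc.length)) p)

def sell_alt (fish : List Int) (mongers : List (Int × Int)) : Int :=
  let prices := sellAltPrices fish mongers []
  (List.zipWith (fun f pr => f * pr) fish prices).foldl (· + ·) 0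

-- ===== PRECONDITION & SPEC =====
def Spec_sell (fish : List Int) (mongers : List (Int × Int)) (out : Int) : Prop := out = sell_alt fish mongers
instance (fish : List Int) (mongers : List (Int × Int)) (out : Int) : Decidable (Spec_sell fish mongers out) := by unfold Spec_sell; infer_instance

-- ===== CLAIM (what is proved, stated in full; the proofs are below) =====
def Claim_equal_sell : Prop := ∀ (fish : List Int) (mongers : List (Int × Int)), Dom_sell fish mongers → Spec_sell fish mongers (sell fish mongers)

-- ===== LEMMAS AND PROOFS =====

-- zipWith truncates to the shorter list; appending on the right splits at the take/drop point.
theorem zipWith_right_append {α β γ : Type} (f : α → β → γ) :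
    ∀ (a : List β) (l : List α) (b : List β),
      List.zipWith f l (a ++ b)
        = List.zipWith f (l.take a.length) a ++ List.zipWith f (l.drop a.length) b := by
  intro a
  induction a with
  | nil => intro l b; simp
  | cons x xs ih =>
      intro l b
      cases l with
      | nil => simp
      | cons y ys => simp [ih]

theorem zipWith_mul_replicate (l : List Int) (n : Nat) (p : Int) :
    List.zipWith (fun f pr => f * pr) l (List.replicate n p)
      = (l.take n).map (· * p) := by
  induction l generalizing n with
  | nil => simp
  | cons y ys ih =>
      cases n with
      | zero => simp
      | succ k => simp [List.replicate_succ, ih]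

theorem sellInner_spec (fish : List Int) (p : Int) :
    ∀ (n i : Nat) (m : Int), i ≤ fish.length →
      sellInner fish p n i m =
        (if i + n ≤ fish.length then
          Sum.inl (i + n, m + (((fish.drop i).take n).map (· * p)).sum)
        else
          Sum.inr (m + ((fish.drop i).map (· * p)).sum)) := by
  intro n
  induction n with
  | zero => intro i m hi; simp [sellInner, hi]
  | succ k ih =>
      intro i m hi
      by_cases h : i = fish.length
      · subst h
        rw [sellInner, if_pos rfl, if_neg (by omega)]
        simp
      · have hlt : i < fish.length := lt_of_le_of_ne hi h
        have hget : fish.getD i 0 = fish[i]'hlt := by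
          simp [List.getD_eq_getElem?_getD, List.getElem?_eq_getElem hlt]
        have hdrop : fish.drop i = fish[i]'hlt :: fish.drop (i+1) :=
          List.drop_eq_getElem_cons hlt
        rw [sellInner, if_neg h, ih (i+1) _ (by omega)]
        by_cases hle : i + (k+1) ≤ fish.length
        · rw [if_pos (by omega), if_pos hle, hdrop, hget]
          rw [List.take_succ_cons, List.map_cons, List.sum_cons]
          simp only [Sum.inl.injEq, Prod.mk.injEq]
          exact ⟨by omega, by ring⟩
        · rw [if_neg (by omega), if_neg hle, hdrop, hget]
          rw [List.map_cons, List.sum_cons]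
          congr 1
          ring

theorem sellGo_spec (fish : List Int) :
    ∀ (ms : List (Int × Int)) (i : Nat) (m : Int), i ≤ fish.length →
      sellGo fish ms i m =
        m + (List.zipWith (fun f pr => f * pr) (fish.drop i)
              (ms.flatMap (fun xp => List.replicate xp.1.toNat xp.2))).sum := by
  intro ms
  induction ms with
  | nil => intro i m hi; simp [sellGo]
  | cons xp rest ih =>
      intro i m hi
      obtain ⟨x, p⟩ := xp
      rw [sellGo, sellInner_spec fish p x.toNat i m hi]
      rw [List.flatMap_cons,
          zipWith_right_append (fun f pr => f * pr) (List.replicate x.toNat p)]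
      simp only [List.length_replicate, List.take_take, Nat.min_self, List.drop_drop,
        zipWith_mul_replicate, List.sum_append]
      by_cases hle : i + x.toNat ≤ fish.length
      · rw [if_pos hle]
        simp only [Sum.elim_inl]
        rw [ih (i + x.toNat) _ (by omega)]
        ring
      · rw [if_neg hle]
        simp only [Sum.elim_inr, id]
        have hlen : (fish.drop i).length ≤ x.toNat := by
          simp [List.length_drop]; omega
        rw [List.take_of_length_le hlen,
            List.drop_eq_nil_of_le (show fish.length ≤ i + x.toNat by omega)]
        simp

-- zipWith only looks at the first l.length entries of its right argument
theorem zipWith_take_right {α β γ : Type} (f : α → β → γ) :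
    ∀ (l : List α) (xs : List β),
      List.zipWith f l xs = List.zipWith f l (xs.take l.length) := by
  intro l
  induction l with
  | nil => intro xs; simp
  | cons y ys ih =>
      intro xs
      cases xs with
      | nil => simp
      | cons z zs =>
          simp only [List.zipWith_cons_cons, List.length_cons, List.take_succ_cons]
          rw [← ih]

-- the capped price list agrees with the full flattened price list on the first fish.length entries
theorem sellAltPrices_take (fish : List Int) :
    ∀ (ms : List (Int × Int)) (acc : List Int),
      (sellAltPrices fish ms acc).take fish.length
        = (acc ++ ms.flatMap (fun xp => List.replicate xp.1.toNat xp.2)).take fish.length := by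
  intro ms
  induction ms with
  | nil => intro acc; simp [sellAltPrices]
  | cons xp rest ih =>
      intro acc
      obtain ⟨x, p⟩ := xp
      rw [sellAltPrices]
      by_cases h : fish.length ≤ acc.length
      · rw [if_pos h, List.take_append_of_le_length h]
      · rw [if_neg h, ih, List.flatMap_cons, ← List.append_assoc]
        simp only [List.take_append, List.length_append,
          List.length_replicate, List.take_replicate]
        have e1 : min (fish.length - acc.length) (min x.toNat (fish.length - acc.length))
            = min (fish.length - acc.length) x.toNat := by omega
        have e2 : fish.length - (acc.length + min x.toNat (fish.length - acc.length))
            = fish.length - (acc.length + x.toNat) := by omega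
        rw [e1, e2]

theorem foldl_add_from (l : List Int) : ∀ a : Int, l.foldl (· + ·) a = a + l.sum := by
  induction l with
  | nil => intro a; simp
  | cons x xs ih => intro a; simp [List.foldl_cons, List.sum_cons, ih]; ring

-- ===== VERDICT (by name: the statement is the Claim_ definition above) =====
theorem sell_spec : Claim_equal_sell := by
  intro fish mongers _
  unfold Spec_sell sell sell_alt
  rw [sellGo_spec fish mongers 0 0 (Nat.zero_le _), foldl_add_from]
  rw [zipWith_take_right _ fish (sellAltPrices fish mongers []),
      sellAltPrices_take fish mongers [], List.nil_append,
      ← zipWith_take_right]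
  simp
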